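-- pv_equiv track=rewrite | github.com/Organ-xiangjikeji/JZSJ-official-website | web/utils.py | hex36
-- ===== SOURCE A (Python) =====
-- def hex36(num):
-- 	key = '1qaz2wssxcde34rfvbgt56yhnmju78iklo9p0'
-- 	a = []
-- 	while num != 0:
-- 		n = num % 6
--
-- 		a.append(key[n])
-- 		num = num // 36
-- 	a.reverse()
-- 	out = ''.join(a)
-- 	return out
-- ===== SOURCE B (Python) =====
-- def hex36(num):
-- 	key = '1qaz2wssxcde34rfvbgt56yhnmju78iklo9p0'
-- 	k = 0
-- 	t = num
-- 	while t != 0: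
-- 		t //= 36
-- 		k += 1
-- 	return ''.join(key[(num // 36 ** i) % 6] for i in range(k - 1, -1, -1))
-- ===== Notes on version B (the rewrite author's own statement) =====
-- stated objective: alternative
-- what changed: Instead of accumulating digits in a list and reversing, B first counts the digits, then emits the string front-to-back, computing digit i directly as key[(num // 36**i) % 6].
import Mathlib
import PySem

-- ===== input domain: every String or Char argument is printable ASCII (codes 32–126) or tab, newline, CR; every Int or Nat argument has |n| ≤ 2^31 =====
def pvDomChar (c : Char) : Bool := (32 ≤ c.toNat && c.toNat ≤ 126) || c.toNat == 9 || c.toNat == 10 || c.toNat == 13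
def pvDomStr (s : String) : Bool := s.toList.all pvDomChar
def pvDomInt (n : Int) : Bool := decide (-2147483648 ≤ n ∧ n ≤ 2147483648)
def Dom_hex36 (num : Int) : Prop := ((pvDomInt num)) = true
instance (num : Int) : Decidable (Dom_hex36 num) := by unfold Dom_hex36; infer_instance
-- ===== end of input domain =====

-- B drops A's digit list + reverse: it counts the digits first and then emits the string
-- front-to-back, computing digit i directly as key[(num // 36**i) % 6] (same values, no speed claim).

-- ===== PORT A =====
-- the key string as a character list; key[n] for n = num % 6 ∈ [0,5] is always in range,
-- so getD is exact for Python's key[n] here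
def hex36Key : List Char := "1qaz2wssxcde34rfvbgt56yhnmju78iklo9p0".toList

-- A's while loop; for num ≥ 0 the loop variable stays a natural number, so it is run
-- over Nat (Nat % and / coincide with Python's % and // on nonnegative values).
-- For num < 0 A's loop never terminates, so A returns nothing there.
def hex36Loop (n : Nat) (a : List Char) : List Char :=
  if n = 0 then a
  else hex36Loop (n / 36) (a ++ [hex36Key.getD (n % 6) ' '])
termination_by n
decreasing_by exact Nat.div_lt_self (Nat.pos_of_ne_zero (by assumption)) (by norm_num)

def hex36 (num : Int) : String :=
  ((hex36Loop num.toNat []).reverse) |> String.ofList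

-- ===== PORT B =====
-- B's first pass: count the base-36 digits (A's and B's loops both diverge for num < 0,
-- so both ports run on num.toNat)
def hex36Len (n : Nat) : Nat :=
  if n = 0 then 0
  else hex36Len (n / 36) + 1
termination_by n
decreasing_by exact Nat.div_lt_self (Nat.pos_of_ne_zero (by assumption)) (by norm_num)

-- B's second pass: ''.join(key[(num // 36**i) % 6] for i in range(k-1,-1,-1))
def hex36_alt (num : Int) : String :=
  (((List.range (hex36Len num.toNat)).reverse).map
    (fun i => hex36Key.getD ((num.toNat / 36 ^ i) % 6) ' ')) |> String.ofList

-- ===== PRECONDITION & SPEC =====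
-- (no Pre_: on num < 0 Python A's loop and Python B's counting loop both never
-- terminate, so neither returns there; both ports map num < 0 through toNat to the
-- num = 0 computation, and the equivalence is total.)
def Spec_hex36 (num : Int) (out : String) : Prop := out = hex36_alt num
instance (num : Int) (out : String) : Decidable (Spec_hex36 num out) := by unfold Spec_hex36; infer_instance

-- ===== CLAIM =====
def Claim_equal_hex36 : Prop := ∀ (num : Int), Dom_hex36 num → Spec_hex36 num (hex36 num)

-- ===== LEMMAS AND PROOFS =====

-- the accumulator only ever receives appended digits
theorem hex36Loop_append (n : Nat) (a : List Char) :
    hex36Loop n a = a ++ hex36Loop n [] := by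
  induction n using Nat.strong_induction_on generalizing a with
  | _ n ih =>
    by_cases h : n = 0
    · simp [hex36Loop, h]
    · have hlt := Nat.div_lt_self (Nat.pos_of_ne_zero h) (by norm_num : 1 < 36)
      conv_lhs => rw [hex36Loop]
      conv_rhs => rw [hex36Loop]
      rw [if_neg h, if_neg h, ih (n / 36) hlt (a ++ _), ih (n / 36) hlt ([] ++ _)]
      simp

-- A's digit list, least-significant first, is B's positional formula over range (hex36Len n)
theorem hex36Loop_eq_map (n : Nat) :
    hex36Loop n [] =
      (List.range (hex36Len n)).map (fun i => hex36Key.getD ((n / 36 ^ i) % 6) ' ') := by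
  induction n using Nat.strong_induction_on with
  | _ n ih =>
    by_cases h : n = 0
    · simp [hex36Loop, hex36Len, h]
    · have hlt := Nat.div_lt_self (Nat.pos_of_ne_zero h) (by norm_num : 1 < 36)
      conv_lhs => rw [hex36Loop]
      rw [if_neg h, hex36Loop_append, ih (n / 36) hlt]
      conv_rhs => rw [hex36Len]
      rw [if_neg h, List.range_succ_eq_map, List.map_cons]
      simp only [List.nil_append, pow_zero, Nat.div_one, List.map_map,
        List.singleton_append]
      congr 1
      apply List.map_congr_left
      intro i _
      simp [Function.comp, Nat.div_div_eq_div_mul, pow_succ, mul_comm]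

-- ===== VERDICT =====
theorem hex36_spec : Claim_equal_hex36 := by
  intro num _
  unfold Spec_hex36 hex36 hex36_alt
  rw [hex36Loop_eq_map, ← List.map_reverse]
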